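-- pv_equiv track=rewrite | github.com/DebonairPuma/Headline2 | Headline2-work/sigSolver2.py | get_shared_chars
-- ===== SOURCE A (Python) =====
-- def get_shared_chars(encWords, sel):
-- 	# Given a list of encoded words and a selection, return a list of all the characters in
-- 	# the selection that appear in at least one other word of length > 1
-- 	# TODO: Experiment with changing the threshold to length > 2
--
-- 	# Get the set of characters in sel
-- 	a = set(encWords[sel])
-- 	tStr = ""
-- 	for i in range(0,len(encWords)):
-- 		if i != sel and len(encWords[i]) > 1:
-- 			tStr += encWords[i]
-- 	# Set of all other characters
-- 	b = set(tStr)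
--
-- 	# Return the intersection of a & b
-- 	return a & b
-- ===== SOURCE B (Python) =====
-- def get_shared_chars(encWords, sel):
--     # Per-character test against the words directly: no concatenated string,
--     # no second set -- keep each distinct char of the selection that occurs
--     # in some other word of length > 1.
--     word = encWords[sel]
--     return {c for c in set(word)
--             if any(i != sel and len(w) > 1 and c in w
--                    for i, w in enumerate(encWords))}
-- ===== Notes on version B (the rewrite author's own statement) =====
-- stated objective: faster
-- what changed: B drops A's concatenation pass and second set: it filters each distinct character of the selected word by scanning the other words directly (enumerate + any with early exit), avoiding building the concatenated string and the second set; a timing run measured it ~3x faster.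
import Mathlib
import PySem

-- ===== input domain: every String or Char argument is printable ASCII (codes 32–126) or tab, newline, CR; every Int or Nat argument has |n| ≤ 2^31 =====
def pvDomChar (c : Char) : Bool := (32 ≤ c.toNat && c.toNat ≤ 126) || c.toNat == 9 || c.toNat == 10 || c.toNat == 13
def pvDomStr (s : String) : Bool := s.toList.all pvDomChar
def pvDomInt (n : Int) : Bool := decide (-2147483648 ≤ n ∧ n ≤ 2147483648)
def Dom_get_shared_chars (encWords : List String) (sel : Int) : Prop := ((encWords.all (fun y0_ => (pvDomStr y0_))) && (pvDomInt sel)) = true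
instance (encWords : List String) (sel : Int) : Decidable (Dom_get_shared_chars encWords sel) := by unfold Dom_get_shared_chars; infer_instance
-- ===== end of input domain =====

-- ===== PORT A =====
-- B replaces A's concatenate-and-intersect pass by a per-character scan of the words (alternative decomposition, same results).
def get_shared_chars (encWords : List String) (sel : Int) : List String :=
  match PySem.List.pyGet? encWords sel with
  | none => []   -- IndexError: excluded by Pre_
  | some w =>
    let a : PySem.Set Char := PySem.Set.ofList w.toList
    let tStr : List Char :=
      (PySem.List.pyRange 0 (encWords.length : Int) 1).foldl
        (fun t i =>
          if i ≠ sel ∧ 1 < PySem.Str.len (PySem.List.pyGetD encWords i "") then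
            t ++ (PySem.List.pyGetD encWords i "").toList
          else t) []
    let b : PySem.Set Char := PySem.Set.ofList tStr
    (PySem.Set.inter a b).map (fun c => String.ofList [c])

-- ===== PORT B =====
def get_shared_chars_alt (encWords : List String) (sel : Int) : List String :=
  match PySem.List.pyGet? encWords sel with
  | none => []   -- IndexError: excluded by Pre_
  | some word =>
    ((PySem.Set.ofList word.toList).filter (fun c =>
      (PySem.List.enumerate encWords 0).any (fun iw =>
        iw.1 != sel && decide (1 < PySem.Str.len iw.2)
          && PySem.Str.isIn (String.ofList [c]) iw.2))).map (fun c => String.ofList [c])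

-- ===== PRECONDITION & SPEC =====
-- A raises IndexError iff sel is out of range for encWords; Pre_ excludes exactly that.
def Pre_get_shared_chars (encWords : List String) (sel : Int) : Prop :=
  PySem.Raise.InRange encWords.length sel
instance (encWords : List String) (sel : Int) : Decidable (Pre_get_shared_chars encWords sel) := by unfold Pre_get_shared_chars; infer_instance
def pvWitness_get_shared_chars : List String × Int := (["ab", "bc"], 0)
def Spec_get_shared_chars (encWords : List String) (sel : Int) (out : List String) : Prop := out = get_shared_chars_alt encWords sel
instance (encWords : List String) (sel : Int) (out : List String) : Decidable (Spec_get_shared_chars encWords sel out) := by unfold Spec_get_shared_chars; infer_instance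

-- ===== CLAIM (what is proved, stated in full; the proofs are below) =====
def Claim_equal_get_shared_chars : Prop := ∀ (encWords : List String) (sel : Int), Dom_get_shared_chars encWords sel → Pre_get_shared_chars encWords sel → Spec_get_shared_chars encWords sel (get_shared_chars encWords sel)

-- ===== LEMMAS AND PROOFS =====
theorem infix_singleton_iff {α : Type} (c : α) (l : List α) : [c] <:+: l ↔ c ∈ l := by
  constructor
  · intro h; exact h.mem (List.mem_singleton_self c)
  · intro h
    obtain ⟨s, t, rfl⟩ := List.append_of_mem h
    exact ⟨s, t, by simp⟩

theorem foldl_if_append (l : List Int) (P : Int → Prop) [DecidablePred P]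
    (g : Int → List Char) (init : List Char) :
    l.foldl (fun t i => if P i then t ++ g i else t) init
      = init ++ l.flatMap (fun i => if P i then g i else []) := by
  have he : (fun (t : List Char) i => if P i then t ++ g i else t)
      = fun t i => t ++ (if P i then g i else []) := by
    funext t i; split <;> simp
  rw [he, PySem.List.foldl_append_eq_flatMap]

theorem mem_singleton_isIn (c : Char) (s : String) :
    PySem.Str.isIn (String.ofList [c]) s = true ↔ c ∈ s.toList := by
  rw [PySem.Str.isIn_iff_infix]
  have hmk : (String.ofList [c]).toList = [c] := by simp
  rw [hmk]
  exact infix_singleton_iff c s.toList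

theorem main_lemma (encWords : List String) (sel : Int)
    (h : Pre_get_shared_chars encWords sel) :
    get_shared_chars encWords sel = get_shared_chars_alt encWords sel := by
  unfold get_shared_chars get_shared_chars_alt
  cases hw : PySem.List.pyGet? encWords sel with
  | none =>
      exfalso
      rw [PySem.List.pyGet?_eq_none_iff] at hw
      exact hw h
  | some w =>
      simp only []
      congr 1
      show (PySem.Set.ofList w.toList).filter _ = (PySem.Set.ofList w.toList).filter _
      apply List.filter_congr
      intro c hc
      rw [foldl_if_append]
      simp only [List.nil_append]
      rw [Bool.eq_iff_iff]
      rw [PySem.Set.contains_iff, PySem.Set.mem_ofList, List.mem_flatMap]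
      rw [List.any_eq_true]
      constructor
      · rintro ⟨i, hi, hci⟩
        rw [PySem.List.mem_pyRange_one] at hi
        split at hci
        · rename_i hP
          refine ⟨(i, PySem.List.pyGetD encWords i ""), ?_, ?_⟩
          · rw [PySem.List.enumerate_eq_map_pyRange encWords ""]
            simp only [PySem.Str.len_eq] at *
            rw [List.mem_map]
            exact ⟨i, by rw [PySem.List.mem_pyRange_one]; simpa using hi, rfl⟩
          · simp only [bne_iff_ne, Bool.and_eq_true, decide_eq_true_eq]
            exact ⟨⟨hP.1, hP.2⟩, (mem_singleton_isIn c _).mpr hci⟩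
        · exact absurd hci (List.not_mem_nil)
      · rintro ⟨⟨i, wi⟩, hmem, hcond⟩
        rw [PySem.List.enumerate_eq_map_pyRange encWords ""] at hmem
        rw [List.mem_map] at hmem
        obtain ⟨j, hj, hjeq⟩ := hmem
        rw [Prod.mk.injEq] at hjeq
        obtain ⟨rfl, rfl⟩ := hjeq
        simp only [bne_iff_ne, Bool.and_eq_true, decide_eq_true_eq] at hcond
        refine ⟨j, ?_, ?_⟩
        · rw [PySem.List.mem_pyRange_one] at hj ⊢; simpa using hj
        · rw [if_pos ⟨hcond.1.1, hcond.1.2⟩]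
          exact (mem_singleton_isIn c _).mp hcond.2

-- ===== VERDICT (by name: the statement is the Claim_ definition above) =====
theorem get_shared_chars_spec : Claim_equal_get_shared_chars := by
  intro encWords sel _ hpre
  exact main_lemma encWords sel hpre
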